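-- pv_equiv track=rewrite | github.com/zhangshuai-neu/leetcode_practice | test_code/tencent_5.py | process
-- ===== SOURCE A (Python) =====
-- import math
--
-- def process_1_length(l, k, all_result):
--     if all_result[l][0] !=-1 and all_result[l][1] == k:
--         return all_result[l][0]
--
--     if k>l:
--         return 1
--     if k==l:
--         return 2
--
--     result_sum = 1 # 全部红
--     K_num_range = math.ceil(l/k)
--     for i in range(l):
--         for k_num in range(1, K_num_range):
--             left_l = i-0-1
--             right_l = l-i-k_num*k +1
--             if right_l>0:
--                 result_sum = result_sum + process_1_length(left_l, k, all_result)
--                 result_sum = result_sum + process_1_length(right_l, k, all_result)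
--     return result_sum
--
-- def process(a, b, k, all_result):
--     result = 0
--     for l in range(a,b+1):
--         l_result = process_1_length(l, k, all_result)
--         all_result[l][0] = l_result
--         all_result[l][1] = k
--         result = result + l_result
--     return result
-- ===== SOURCE B (Python) =====
-- import math
--
-- # Bottom-up DP: dp[j] holds the count for length j-1; each entry is computed once
-- # from earlier entries, replacing A's exponential memo-table recursion.
-- # Like A, fills all_result[l][0..1] for l in range(a, b+1) (same in-place mutation).
-- def process(a, b, k, all_result):
--     if b < a:
--         return 0
--     dp = []  # dp[j] = count for length l = j-1, j = 0 .. b+1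
--     for j in range(b + 2):
--         l = j - 1
--         if k > l:
--             e = 1
--         elif k == l:
--             e = 2
--         else:
--             C = math.ceil(l / k)
--             e = 1
--             for i in range(l):
--                 cnt = max(0, min(C - 1, (l - i) // k))
--                 e += cnt * dp[i]
--                 for m in range(1, cnt + 1):
--                     e += dp[l - i + 2 - m * k]
--         dp.append(e)
--     result = 0
--     for l in range(a, b + 1):
--         all_result[l][0] = dp[l + 1]
--         all_result[l][1] = k
--         result += dp[l + 1]
--     return result
-- ===== Notes on version B (the rewrite author's own statement) =====
-- stated objective: faster
-- what changed: A counts via a top-down recursion over a shared mutable memo table that re-derives every subresult through recursive calls (and recomputes entire subtrees whenever the table has no entry, exponentially for a = b); B fills a bottom-up DP array once, smallest length first, with each entry computed from earlier entries by a closed inner-loop bound cnt = min(ceil(l/k)-1, (l-i)//k) instead of A's guarded scan over the full range, then sums dp[a+1..b+1]; Pre_ only excludes inputs where A raises (k=0 with b>=1: ZeroDivisionError; k=1 with b>=2: unbounded self-recursion, RecursionError; …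
-- outside the precondition, e.g. on process(0, 0, 5, [[7, 5]]): A returns 7, B returns 1; on process(-1, 2, 2, [[-1, -1], [-1, -1], [-1, -1]]): A returns 4, B returns 5
import Mathlib
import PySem

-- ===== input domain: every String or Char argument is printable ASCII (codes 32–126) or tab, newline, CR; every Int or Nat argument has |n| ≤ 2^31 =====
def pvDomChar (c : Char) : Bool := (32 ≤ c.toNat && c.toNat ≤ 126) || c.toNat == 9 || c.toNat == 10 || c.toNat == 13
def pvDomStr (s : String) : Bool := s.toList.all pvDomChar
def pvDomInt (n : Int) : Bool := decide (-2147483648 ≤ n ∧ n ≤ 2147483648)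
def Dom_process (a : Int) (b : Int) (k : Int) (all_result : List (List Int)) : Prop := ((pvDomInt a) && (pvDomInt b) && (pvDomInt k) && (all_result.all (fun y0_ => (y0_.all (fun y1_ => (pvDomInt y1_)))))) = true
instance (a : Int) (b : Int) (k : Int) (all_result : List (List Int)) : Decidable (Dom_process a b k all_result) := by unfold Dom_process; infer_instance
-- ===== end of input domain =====

-- B replaces A's memoized recursion by a bottom-up DP array filled once, smallest length first
-- (in Python, B performs the same in-place fill of all_result[a..b] as A; the theorems below are
-- about the return value).

-- ===== PORT A =====

-- math.ceil(l / k): exact for |l|, |k| ≤ 2^31, k ≠ 0 (there the float quotient's rounding error is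
-- smaller than its distance to the next integer); k = 0 raises in Python (excluded by Pre_).
def pvCeil (l k : Int) : Int := -(PySem.Int.floordiv (-l) k)

-- all_result[l]; the .getD [] default is taken only where Python raises IndexError (excluded by Pre_)
def pvRow (tbl : List (List Int)) (l : Int) : List Int := (PySem.List.pyGet? tbl l).getD []

-- process_1_length; the fuel makes the (for k = 1 non-terminating) recursion a total function:
-- with the fuel `process` supplies, the 0 branch is never reached on Pre_ inputs
def process1Length (k : Int) (fuel : Nat) (tbl : List (List Int)) (l : Int) : Int :=
  match fuel with
  | 0 => 0
  | fuel' + 1 =>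
    let row := pvRow tbl l
    let r0 := (PySem.List.pyGet? row 0).getD 0
    let r1 := (PySem.List.pyGet? row 1).getD 0
    if r0 ≠ -1 ∧ r1 = k then r0
    else if k > l then 1
    else if k = l then 2
    else
      (PySem.List.pyRange 0 l 1).foldl (fun s i =>
        (PySem.List.pyRange 1 (pvCeil l k) 1).foldl (fun s k_num =>
          let left_l := i - 0 - 1
          let right_l := l - i - k_num * k + 1
          if right_l > 0 then
            s + process1Length k fuel' tbl left_l + process1Length k fuel' tbl right_l
          else s) s) 1

-- all_result[l][0] = v; all_result[l][1] = k — exact for 0 ≤ l < len(all_result) (guaranteed by Pre_)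
def pvWrite (tbl : List (List Int)) (l : Int) (v k : Int) : List (List Int) :=
  tbl.set l.toNat (((pvRow tbl l).set 0 v).set 1 k)

-- on Pre_ inputs every recursive call strictly decreases l and l ≥ -1, so fuel (l+2)+1 is never exhausted
def process (a : Int) (b : Int) (k : Int) (all_result : List (List Int)) : Int :=
  ((PySem.List.pyRange a (b + 1) 1).foldl
    (fun (st : List (List Int) × Int) l =>
      let lr := process1Length k ((l + 2).toNat + 1) st.1 l
      (pvWrite st.1 l lr k, st.2 + lr))
    (all_result, 0)).2

-- ===== PORT B =====

-- one bottom-up DP entry: the count for length l computed from the entries for smaller lengths;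
-- on Pre_ inputs all dp[x] indices are in range, where .getD/.toNat are exact
def dpEntry (k : Int) (dp : List Int) (l : Int) : Int :=
  if k > l then 1
  else if k = l then 2
  else
    (PySem.List.pyRange 0 l 1).foldl (fun e i =>
      let cnt := max 0 (min (pvCeil l k - 1) (PySem.Int.floordiv (l - i) k))
      (PySem.List.pyRange 1 (cnt + 1) 1).foldl
        (fun e m => e + dp.getD (l - i + 2 - m * k).toNat 0)
        (e + cnt * dp.getD i.toNat 0)) 1

-- the dp list after j append steps (dp[j] = count for length j - 1)
def buildDp (k : Int) : Nat → List Int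
  | 0 => []
  | j + 1 => (buildDp k j) ++ [dpEntry k (buildDp k j) ((j : Int) - 1)]

def process_alt (a : Int) (b : Int) (k : Int) (all_result : List (List Int)) : Int :=
  if b < a then 0
  else
    let dp := buildDp k (b + 2).toNat
    (PySem.List.pyRange a (b + 1) 1).foldl
      (fun r l => r + dp.getD (l + 1).toNat 0) 0

-- ===== PRECONDITION & SPEC =====

-- a memo row A can read without raising and without a pre-planted cache hit:
-- row[0] exists and is -1, or row[0] ≠ -1 and row[1] exists and differs from k
def pvNoHit (row : List Int) (k : Int) : Bool :=
  match row with
  | [] => false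
  | x :: rest => x == -1 || (match rest with | [] => false | y :: _ => y ≠ k)

-- Pre_ excludes exactly (i) the inputs on which A RAISES: k = 0 with 1 ≤ b (math.ceil(l/0),
-- ZeroDivisionError), k = 1 with 2 ≤ b (process_1_length(l) re-calls itself with the same l at
-- i = 0, k_num = 1, so the recursion never terminates: RecursionError), and memo-table shapes that
-- raise IndexError (b ≥ len(all_result), or a reachable row shorter than the reads/writes need);
-- and (ii) two defensible-corner artefacts of A's memo table on which A still returns a value:
-- tables carrying a pre-planted cache hit (a reachable row with row[0] ≠ -1 and row[1] = k, whose
-- planted value A returns verbatim instead of counting) and negative start indices a < 0, where A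
-- reads and writes the memo table through Python's negative-index wraparound, aliasing rows.
def Pre_process (a : Int) (b : Int) (k : Int) (all_result : List (List Int)) : Prop :=
  b < a ∨
  (0 ≤ a ∧ b < all_result.length ∧
   ¬(k = 0 ∧ 1 ≤ b) ∧ ¬(k = 1 ∧ 2 ≤ b) ∧
   (∀ j ∈ List.range (b + 1).toNat, pvNoHit (all_result.getD j []) k = true) ∧
   pvNoHit (all_result.getD (all_result.length - 1) []) k = true ∧
   (∀ j ∈ List.range (b + 1).toNat, a ≤ (j : Int) → 2 ≤ (all_result.getD j []).length))

instance (a : Int) (b : Int) (k : Int) (all_result : List (List Int)) : Decidable (Pre_process a b k all_result) := by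
  unfold Pre_process; infer_instance

def pvWitness_process : Int × Int × Int × List (List Int) :=
  (0, 2, 2, [[-1, -1], [-1, -1], [-1, -1]])

def Spec_process (a : Int) (b : Int) (k : Int) (all_result : List (List Int)) (out : Int) : Prop :=
  out = process_alt a b k all_result
instance (a : Int) (b : Int) (k : Int) (all_result : List (List Int)) (out : Int) : Decidable (Spec_process a b k all_result out) := by
  unfold Spec_process; infer_instance

-- ===== CLAIM (what is proved, stated in full; the proofs are below) =====
def Claim_equal_process : Prop := ∀ (a : Int) (b : Int) (k : Int) (all_result : List (List Int)), Dom_process a b k all_result → Pre_process a b k all_result → Spec_process a b k all_result (process a b k all_result)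

-- ===== LEMMAS AND PROOFS =====

lemma buildDp_length (k : Int) (m : Nat) : (buildDp k m).length = m := by
  induction m with
  | zero => rfl
  | succ j ih => simp [buildDp, ih]

lemma buildDp_getD (k : Int) (m j : Nat) (h : j < m) :
    (buildDp k m).getD j 0 = dpEntry k (buildDp k j) ((j : Int) - 1) := by
  induction m with
  | zero => omega
  | succ n ih =>
    rcases Nat.lt_succ_iff_lt_or_eq.mp h with h' | h'
    · rw [buildDp, List.getD_append _ _ _ _ (by rw [buildDp_length]; exact h'), ih h']
    · subst h'
      rw [buildDp, List.getD_eq_getElem?_getD]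
      have : (buildDp k j ++ [dpEntry k (buildDp k j) ((j : Int) - 1)])[j]? = some (dpEntry k (buildDp k j) ((j : Int) - 1)) := by
        have h0 := @List.getElem?_concat_length _ (buildDp k j) (dpEntry k (buildDp k j) ((j : Int) - 1))
        rwa [buildDp_length] at h0
      rw [this]
      rfl

lemma foldl_ge {α : Type} (f : Int → α → Int) (h : ∀ e x, e ≤ f e x) :
    ∀ (l : List α) (s : Int), s ≤ l.foldl f s := by
  intro l
  induction l with
  | nil => intro s; simp
  | cons x xs ih => intro s; exact le_trans (h s x) (ih (f s x))

lemma getD_nonneg (dp : List Int) (h : ∀ v ∈ dp, (0:Int) ≤ v) (x : Nat) : 0 ≤ dp.getD x 0 := by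
  rw [List.getD_eq_getElem?_getD]
  cases hx : dp[x]? with
  | none => simp
  | some v => simpa using h v (List.mem_of_getElem? hx)

lemma dpEntry_pos (k : Int) (dp : List Int) (l : Int) (h : ∀ v ∈ dp, (0:Int) ≤ v) :
    1 ≤ dpEntry k dp l := by
  unfold dpEntry
  split_ifs
  · norm_num
  · norm_num
  · refine foldl_ge _ (fun e i => ?_) _ 1
    refine le_trans ?_ (foldl_ge _ (fun e' m => ?_) _ _)
    · have : 0 ≤ max 0 (min (pvCeil l k - 1) (PySem.Int.floordiv (l - i) k)) := le_max_left _ _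
      nlinarith [getD_nonneg dp h i.toNat]
    · simpa using getD_nonneg dp h (l - i + 2 - m * k).toNat

lemma buildDp_pos (k : Int) (m : Nat) : ∀ v ∈ buildDp k m, 1 ≤ v := by
  induction m with
  | zero => simp [buildDp]
  | succ j ih =>
    intro v hv
    rw [buildDp] at hv
    rcases List.mem_append.mp hv with h | h
    · exact ih v h
    · rw [List.mem_singleton.mp h]
      exact dpEntry_pos _ _ _ (fun v hv => le_trans (by norm_num) (ih v hv))

lemma pvCeil_bracket (l k : Int) (hk : 0 < k) :
    (pvCeil l k - 1) * k < l ∧ l ≤ pvCeil l k * k :=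
  (PySem.Int.neg_floordiv_neg_eq_iff_of_pos hk).mp rfl

lemma pvCeil_nonpos (l k : Int) (hl : 1 ≤ l) (hk : k < 0) : pvCeil l k ≤ 0 := by
  have h1 : PySem.Int.floordiv (-l) k = PySem.Int.floordiv l (-k) := by
    have := PySem.Int.floordiv_neg_neg l (-k)
    simpa using this
  have h2 : 0 ≤ PySem.Int.floordiv l (-k) :=
    (PySem.Int.le_floordiv_iff_mul_le (by omega)).mpr (by omega)
  unfold pvCeil
  omega

lemma pv_inner_sum (k l i : Int) (hk : 2 ≤ k) (hkl : k < l) (hil : i < l)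
    (x : Int) (g : Int → Int) (s : Int) :
    (PySem.List.pyRange 1 (pvCeil l k) 1).foldl
      (fun s m => if l - i - m * k + 1 > 0 then s + x + g m else s) s
    = (PySem.List.pyRange 1 (max 0 (min (pvCeil l k - 1) (PySem.Int.floordiv (l - i) k)) + 1) 1).foldl
      (fun s m => s + g m) (s + max 0 (min (pvCeil l k - 1) (PySem.Int.floordiv (l - i) k)) * x) := by
  have hq0 : 0 ≤ PySem.Int.floordiv (l - i) k :=
    (PySem.Int.le_floordiv_iff_mul_le (by omega)).mpr (by omega)
  obtain ⟨hbr1, hbr2⟩ := pvCeil_bracket l k (by omega)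
  have hC2 : 2 ≤ pvCeil l k := by nlinarith [hbr2]
  set C := pvCeil l k with hC
  set q := PySem.Int.floordiv (l - i) k with hqdef
  set cnt := min (C - 1) q with hcnt
  have hcnt0 : 0 ≤ cnt := by
    have : C - 1 ≥ 1 := by omega
    omega
  have hmaxeq : max 0 cnt = cnt := max_eq_right hcnt0
  rw [hmaxeq]
  have hguard : ∀ m : Int, (m * k ≤ l - i ↔ m ≤ q) := by
    intro m
    exact (PySem.Int.le_floordiv_iff_mul_le (by omega)).symm
  -- rewrite the guarded body
  rw [PySem.List.foldl_congr_mem'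
        (l := PySem.List.pyRange 1 C)
        (f := fun s m => if l - i - m * k + 1 > 0 then s + x + g m else s)
        (g := fun s m => s + (if m ≤ cnt then x + g m else 0))
        (init := s)
        (by
          intro m hm acc
          obtain ⟨hm1, hm2⟩ := PySem.List.mem_pyRange_one.mp hm
          show (if l - i - m * k + 1 > 0 then acc + x + g m else acc)
              = acc + (if m ≤ cnt then x + g m else 0)
          by_cases hle : m ≤ cnt
          · have : m ≤ q := by omega
            have : m * k ≤ l - i := (hguard m).mpr this
            rw [if_pos (by omega), if_pos hle]; ring
          · have hmq : ¬ (m ≤ q) := by omega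
            have : ¬ (m * k ≤ l - i) := fun hc => hmq ((hguard m).mp hc)
            rw [if_neg (by omega), if_neg hle]; ring)]
  rw [PySem.List.foldl_add, PySem.List.foldl_add]
  rw [PySem.List.pyRange_one_append 1 (cnt + 1) C (by omega) (by omega)]
  rw [List.map_append, List.sum_append]
  have hzero : ((PySem.List.pyRange (cnt + 1) C).map (fun m => if m ≤ cnt then x + g m else 0)).sum = 0 := by
    apply List.sum_eq_zero
    intro y hy
    obtain ⟨m, hm, rfl⟩ := List.mem_map.mp hy
    obtain ⟨hm1, _⟩ := PySem.List.mem_pyRange_one.mp hm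
    rw [if_neg (by omega)]
  rw [hzero]
  have hone : ((PySem.List.pyRange 1 (cnt + 1)).map (fun m => if m ≤ cnt then x + g m else 0)).sum
      = ((PySem.List.pyRange 1 (cnt + 1)).map (fun m => x + g m)).sum := by
    congr 1
    apply List.map_congr_left
    intro m hm
    obtain ⟨_, hm2⟩ := PySem.List.mem_pyRange_one.mp hm
    rw [if_pos (by omega)]
  rw [hone, PySem.List.sum_map_add_int, PySem.List.sum_map_const_int,
      PySem.List.length_pyRange_one]
  have : ((cnt + 1 - 1).toNat : Int) = cnt := by omega
  rw [this]
  ring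

lemma pvNoHit_cond (row : List Int) (k : Int) (h : pvNoHit row k = true) :
    ¬(((PySem.List.pyGet? row 0).getD 0) ≠ -1 ∧ ((PySem.List.pyGet? row 1).getD 0) = k) := by
  match row with
  | [] => simp [pvNoHit] at h
  | x :: rest =>
    simp only [pvNoHit, Bool.or_eq_true, beq_iff_eq] at h
    rcases h with h | h
    · subst h
      simp
    · match rest with
      | [] => simp at h
      | y :: rest' =>
        simp only [decide_eq_true_eq] at h
        intro hc
        apply h
        have : (PySem.List.pyGet? (x :: y :: rest') 1).getD 0 = y := by
          rw [show (1 : Int) = ((0 : Nat) : Int) + 1 by norm_num, PySem.List.pyGet?_cons_succ]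
          simp
        rw [this] at hc
        exact hc.2

lemma getD_pos (dp : List Int) (h : ∀ v ∈ dp, (1:Int) ≤ v) (j : Nat) (hj : j < dp.length) :
    1 ≤ dp.getD j 0 := by
  rw [List.getD_eq_getElem?_getD, List.getElem?_eq_getElem hj]
  exact h _ (List.getElem_mem hj)

lemma foldl_const {α : Type} (l : List α) (s : Int) : l.foldl (fun s _ => s) s = s := by
  induction l with
  | nil => rfl
  | cons x xs ih => simp [ih]

lemma buildDp_getD_agree (k : Int) (m1 m2 j : Nat) (h1 : j < m1) (h2 : m1 ≤ m2) :
    (buildDp k m1).getD j 0 = (buildDp k m2).getD j 0 := by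
  rw [buildDp_getD k m1 j h1, buildDp_getD k m2 j (by omega)]

lemma p1_eq
    (k a b : Int) (tbl0 : List (List Int))
    (hk : k < 0 ∨ 2 ≤ k ∨ b ≤ k)
    (ha : 0 ≤ a) (hab : a ≤ b) (hb : b < tbl0.length)
    (hnh : ∀ j ∈ List.range (b + 1).toNat, pvNoHit (tbl0.getD j []) k = true)
    (hlast : pvNoHit (tbl0.getD (tbl0.length - 1) []) k = true)
    (hlen : ∀ j ∈ List.range (b + 1).toNat, a ≤ (j : Int) → 2 ≤ (tbl0.getD j []).length) :
    ∀ (fuel : Nat) (l : Int) (tbl : List (List Int)) (L : Nat),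
      -1 ≤ l → l ≤ b → (l + 2).toNat ≤ fuel → (L : Int) ≤ b →
      tbl.length = tbl0.length →
      (∀ j : Nat, j < tbl0.length →
        ((j < a.toNat ∨ L ≤ j) → tbl.getD j [] = tbl0.getD j []) ∧
        (a.toNat ≤ j → j < L →
          tbl.getD j [] = ((tbl0.getD j []).set 0 ((buildDp k (b + 2).toNat).getD (j + 1) 0)).set 1 k)) →
      process1Length k fuel tbl l = (buildDp k (b + 2).toNat).getD (l + 1).toNat 0 := by
  intro fuel
  induction fuel with
  | zero => intro l tbl L hl1 hl2 hfuel hLb hlen_eq hinv; omega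
  | succ f ih =>
    intro l tbl L hl1 hl2 hfuel hLb hlen_eq hinv
    have hDlen : (buildDp k (b + 2).toNat).length = (b + 2).toNat := buildDp_length _ _
    have hDpos : ∀ j : Nat, j < (b + 2).toNat → 1 ≤ (buildDp k (b + 2).toNat).getD j 0 := fun j hj =>
      getD_pos _ (buildDp_pos k _) j (by rwa [hDlen])
    have hRHS : (buildDp k (b + 2).toNat).getD (l + 1).toNat 0
        = dpEntry k (buildDp k (l + 1).toNat) l := by
      rw [buildDp_getD k _ _ (by omega)]
      congr 1
      omega
    by_cases hneg : l = -1
    · subst hneg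
      have hgl : PySem.List.pyGet? tbl (-1) = tbl[tbl.length - 1]? := by
        rw [PySem.List.pyGet?_neg_one, List.getLast?_eq_getElem?]
      have hrow : pvRow tbl (-1) = tbl0.getD (tbl0.length - 1) [] := by
        rw [pvRow, hgl, ← List.getD_eq_getElem?_getD, hlen_eq]
        exact (hinv (tbl0.length - 1) (by omega)).1 (Or.inr (by omega))
      have hmiss := pvNoHit_cond _ k hlast
      rw [← hrow] at hmiss
      simp only [process1Length]
      rw [if_neg hmiss, hRHS]
      show _ = dpEntry k (buildDp k 0) (-1)
      rw [dpEntry]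
      by_cases h1 : k > -1
      · rw [if_pos h1, if_pos h1]
      · rw [if_neg h1, if_neg h1]
        by_cases h2 : k = -1
        · rw [if_pos h2, if_pos h2]
        · rw [if_neg h2, if_neg h2,
              PySem.List.pyRange_one_eq_nil (by omega : (-1:Int) ≤ 0)]
          rfl
    · -- 0 ≤ l
      have hl0 : 0 ≤ l := by omega
      have hjn : l.toNat < tbl0.length := by omega
      have hrow : pvRow tbl l = tbl.getD l.toNat [] := by
        rw [pvRow, PySem.List.pyGet?_of_nonneg _ hl0, List.getD_eq_getElem?_getD]
      simp only [process1Length]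
      by_cases hw : a.toNat ≤ l.toNat ∧ l.toNat < L
      · -- written row: memo hit returns the DP value
        have hrw := (hinv l.toNat (by omega)).2 hw.1 hw.2
        have hol : 2 ≤ (tbl0.getD l.toNat []).length :=
          hlen l.toNat (List.mem_range.mpr (by omega)) (by omega)
        have hv1 : 1 ≤ (buildDp k (b + 2).toNat).getD (l.toNat + 1) 0 := hDpos _ (by omega)
        have h0 : (PySem.List.pyGet? (pvRow tbl l) 0).getD 0
            = (buildDp k (b + 2).toNat).getD (l.toNat + 1) 0 := by
          rw [hrow, hrw, PySem.List.pyGet?_of_nonneg _ (by norm_num)]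
          rw [show ((0:Int).toNat) = 0 from rfl,
              List.getElem?_set_ne (by norm_num : (1:Nat) ≠ 0),
              List.getElem?_set_self (by omega)]
          rfl
        have h1 : (PySem.List.pyGet? (pvRow tbl l) 1).getD 0 = k := by
          rw [hrow, hrw, PySem.List.pyGet?_of_nonneg _ (by norm_num)]
          rw [show ((1:Int).toNat) = 1 from rfl,
              List.getElem?_set_self (by simp only [List.length_set]; omega)]
          rfl
        rw [h0, h1, if_pos ⟨by omega, rfl⟩]
        congr 1
        omega
      · -- unwritten row: memo miss
        have hun : tbl.getD l.toNat [] = tbl0.getD l.toNat [] := by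
          apply (hinv l.toNat (by omega)).1
          omega
        have hmiss := pvNoHit_cond _ k (hnh l.toNat (List.mem_range.mpr (by omega)))
        rw [← hun, ← hrow] at hmiss
        rw [if_neg hmiss, hRHS, dpEntry]
        by_cases hkl : k > l
        · rw [if_pos hkl, if_pos hkl]
        · rw [if_neg hkl, if_neg hkl]
          by_cases hke : k = l
          · rw [if_pos hke, if_pos hke]
          · rw [if_neg hke, if_neg hke]
            -- k < l
            have hkl2 : k < l := by omega
            rcases hk with hk | hk | hk
            · -- k < 0: all loops are empty on both sides
              by_cases hlz : l = 0
              · subst hlz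
                rw [PySem.List.pyRange_one_eq_nil (by omega : (0:Int) ≤ 0)]
                rfl
              · have hC := pvCeil_nonpos l k (by omega) hk
                refine Eq.trans
                  (PySem.List.foldl_congr_mem' (g := fun (s : Int) (_ : Int) => s) _ _ _ ?_)
                  (Eq.trans (foldl_const _ _) ?_)
                · intro i hi acc
                  simp only [PySem.List.pyRange_one_eq_nil (show pvCeil l k ≤ (1:Int) by omega),
                    List.foldl_nil]
                · refine Eq.symm (Eq.trans
                    (PySem.List.foldl_congr_mem' (g := fun (s : Int) (_ : Int) => s) _ _ _ ?_)
                    (foldl_const _ _))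
                  intro i hi acc
                  have hz : max 0 (min (pvCeil l k - 1) (PySem.Int.floordiv (l - i) k)) = 0 := by
                    omega
                  simp only [hz, zero_add, zero_mul, add_zero,
                    PySem.List.pyRange_one_eq_nil (le_refl (1:Int)), List.foldl_nil]
            · -- 2 ≤ k: the main case
              refine PySem.List.foldl_congr_mem' _ _ _ _ ?_
              intro i hi acc
              obtain ⟨hi0, hil⟩ := PySem.List.mem_pyRange_one.mp hi
              have hq : ∀ m : Int, m ≤ PySem.Int.floordiv (l - i) k ↔ m * k ≤ l - i := by
                intro m
                exact (PySem.Int.le_floordiv_iff_mul_le (by omega))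
              have stepA :
                  (PySem.List.pyRange 1 (pvCeil l k) 1).foldl (fun s k_num =>
                    let left_l := i - 0 - 1
                    let right_l := l - i - k_num * k + 1
                    if right_l > 0 then
                      s + process1Length k f tbl left_l + process1Length k f tbl right_l
                    else s) acc
                  = (PySem.List.pyRange 1 (pvCeil l k) 1).foldl (fun s m =>
                      if l - i - m * k + 1 > 0 then
                        s + (buildDp k (b + 2).toNat).getD i.toNat 0
                          + (buildDp k (b + 2).toNat).getD (l - i + 2 - m * k).toNat 0
                      else s) acc := by
                refine PySem.List.foldl_congr_mem' _ _ _ _ ?_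
                intro m hm acc'
                obtain ⟨hm1, hm2⟩ := PySem.List.mem_pyRange_one.mp hm
                show (if l - i - m * k + 1 > 0 then
                        acc' + process1Length k f tbl (i - 0 - 1)
                          + process1Length k f tbl (l - i - m * k + 1)
                      else acc') = _
                by_cases hg : l - i - m * k + 1 > 0
                · rw [if_pos hg, if_pos hg,
                      ih (i - 0 - 1) tbl L (by omega) (by omega) (by omega) hLb hlen_eq hinv,
                      ih (l - i - m * k + 1) tbl L (by omega) (by nlinarith) (by
                        have : l - i - m * k + 1 ≤ l - 1 := by nlinarith
                        omega) hLb hlen_eq hinv]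
                  have e1 : (i - 0 - 1 + 1).toNat = i.toNat := by omega
                  have e2 : (l - i - m * k + 1 + 1).toNat = (l - i + 2 - m * k).toNat := by
                    congr 1
                    ring
                  rw [e1, e2]
                · rw [if_neg hg, if_neg hg]
              have stepB := pv_inner_sum k l i hk hkl2 hil
                ((buildDp k (b + 2).toNat).getD i.toNat 0)
                (fun m => (buildDp k (b + 2).toNat).getD (l - i + 2 - m * k).toNat 0) acc
              have hagree : ∀ jx : Nat, jx < (l + 1).toNat →
                  (buildDp k (b + 2).toNat).getD jx 0 = (buildDp k (l + 1).toNat).getD jx 0 :=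
                fun jx hjx => (buildDp_getD_agree k (l + 1).toNat (b + 2).toNat jx hjx (by omega)).symm
              show _ = (PySem.List.pyRange 1 (max 0 (min (pvCeil l k - 1) (PySem.Int.floordiv (l - i) k)) + 1) 1).foldl
                  (fun e m => e + (buildDp k (l + 1).toNat).getD (l - i + 2 - m * k).toNat 0)
                  (acc + max 0 (min (pvCeil l k - 1) (PySem.Int.floordiv (l - i) k))
                    * (buildDp k (l + 1).toNat).getD i.toNat 0)
              rw [stepA, stepB, hagree i.toNat (by omega)]
              refine PySem.List.foldl_congr_mem' _ _ _ _ ?_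
              intro m hm acc'
              obtain ⟨hm1, hm2⟩ := PySem.List.mem_pyRange_one.mp hm
              have hmq : m * k ≤ l - i := by
                refine (hq m).mp ?_
                have hC1 := pvCeil_bracket l k (by omega)
                omega
              show acc' + _ = acc' + _
              rw [hagree (l - i + 2 - m * k).toNat (by
                have : l - i + 2 - m * k ≤ l := by nlinarith
                omega)]
            · omega

lemma loop_eq
    (k a b : Int) (tbl0 : List (List Int))
    (hk : k < 0 ∨ 2 ≤ k ∨ b ≤ k)
    (ha : 0 ≤ a) (hab : a ≤ b) (hb : b < tbl0.length)
    (hnh : ∀ j ∈ List.range (b + 1).toNat, pvNoHit (tbl0.getD j []) k = true)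
    (hlast : pvNoHit (tbl0.getD (tbl0.length - 1) []) k = true)
    (hlen : ∀ j ∈ List.range (b + 1).toNat, a ≤ (j : Int) → 2 ≤ (tbl0.getD j []).length) :
    ∀ (c : Nat) (tbl : List (List Int)) (res : Int) (L : Nat),
      (L : Int) = b + 1 - (c : Int) → a ≤ (L : Int) →
      tbl.length = tbl0.length →
      (∀ j : Nat, j < tbl0.length →
        ((j < a.toNat ∨ L ≤ j) → tbl.getD j [] = tbl0.getD j []) ∧
        (a.toNat ≤ j → j < L →
          tbl.getD j [] = ((tbl0.getD j []).set 0 ((buildDp k (b + 2).toNat).getD (j + 1) 0)).set 1 k)) →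
      ((PySem.List.pyRange (L : Int) (b + 1) 1).foldl
        (fun (st : List (List Int) × Int) l =>
          let lr := process1Length k ((l + 2).toNat + 1) st.1 l
          (pvWrite st.1 l lr k, st.2 + lr)) (tbl, res)).2
      = (PySem.List.pyRange (L : Int) (b + 1) 1).foldl
          (fun r l => r + (buildDp k (b + 2).toNat).getD (l + 1).toNat 0) res := by
  intro c
  induction c with
  | zero =>
    intro tbl res L hL haL hlen_eq hinv
    rw [PySem.List.pyRange_one_eq_nil (by omega)]
    rfl
  | succ c ihc =>
    intro tbl res L hL haL hlen_eq hinv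
    have hLb : (L : Int) ≤ b := by omega
    have hLn : L < tbl0.length := by omega
    rw [PySem.List.pyRange_one_cons (by omega : (L : Int) < b + 1)]
    simp only [List.foldl_cons]
    have hlr : process1Length k (((L : Int) + 2).toNat + 1) tbl (L : Int)
        = (buildDp k (b + 2).toNat).getD ((L : Int) + 1).toNat 0 :=
      p1_eq k a b tbl0 hk ha hab hb hnh hlast hlen _ (L : Int) tbl L
        (by omega) hLb (by omega) hLb hlen_eq hinv
    have hrowL : pvRow tbl (L : Int) = tbl.getD L [] := by
      rw [pvRow, PySem.List.pyGet?_of_nonneg _ (by omega), List.getD_eq_getElem?_getD]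
      norm_num
    have hLw : tbl.getD L [] = tbl0.getD L [] := (hinv L hLn).1 (Or.inr le_rfl)
    have hinv' : ∀ j : Nat, j < tbl0.length →
        (((j < a.toNat ∨ L + 1 ≤ j)) →
          (pvWrite tbl (L : Int) (process1Length k (((L : Int) + 2).toNat + 1) tbl (L : Int)) k).getD j []
            = tbl0.getD j []) ∧
        (a.toNat ≤ j → j < L + 1 →
          (pvWrite tbl (L : Int) (process1Length k (((L : Int) + 2).toNat + 1) tbl (L : Int)) k).getD j []
            = ((tbl0.getD j []).set 0 ((buildDp k (b + 2).toNat).getD (j + 1) 0)).set 1 k) := by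
      intro j hj
      have htoNat : ((L : Int)).toNat = L := by omega
      by_cases hjL : j = L
      · have hself : (pvWrite tbl (L : Int) (process1Length k (((L : Int) + 2).toNat + 1) tbl (L : Int)) k).getD L []
            = ((pvRow tbl (L : Int)).set 0 (process1Length k (((L : Int) + 2).toNat + 1) tbl (L : Int))).set 1 k := by
          rw [pvWrite, htoNat, List.getD_eq_getElem?_getD,
              List.getElem?_set_self (by omega), Option.getD_some]
        constructor
        · intro hcase
          exfalso
          omega
        · intro _ _
          rw [hjL, hself, hrowL, hLw, hlr]
          congr 2
      · have hother : (pvWrite tbl (L : Int) (process1Length k (((L : Int) + 2).toNat + 1) tbl (L : Int)) k).getD j []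
            = tbl.getD j [] := by
          rw [pvWrite, htoNat, List.getD_eq_getElem?_getD,
              List.getElem?_set_ne (by omega), ← List.getD_eq_getElem?_getD]
        constructor
        · intro hcase
          rw [hother]
          exact (hinv j hj).1 (by omega)
        · intro h1 h2
          rw [hother]
          exact (hinv j hj).2 h1 (by omega)
    have hstep := ihc (pvWrite tbl (L : Int) (process1Length k (((L : Int) + 2).toNat + 1) tbl (L : Int)) k)
      (res + process1Length k (((L : Int) + 2).toNat + 1) tbl (L : Int))
      (L + 1) (by push_cast; omega) (by push_cast; omega)
      (by rw [pvWrite, List.length_set, hlen_eq]) hinv'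
    push_cast at hstep
    rw [hstep, hlr]

-- ===== VERDICT (by name: the statement is the Claim_ definition above) =====
theorem process_spec : Claim_equal_process := by
  intro a b k all_result _ hpre
  show process a b k all_result = process_alt a b k all_result
  by_cases hba : b < a
  · rw [process, process_alt, PySem.List.pyRange_one_eq_nil (by omega), if_pos hba]
    rfl
  · rcases hpre with h | ⟨ha, hb, hk0, hk1, hnh, hlast, hlen⟩
    · omega
    · have hab : a ≤ b := by omega
      have hkk : k < 0 ∨ 2 ≤ k ∨ b ≤ k := by omega
      have hcast : ((a.toNat : Int)) = a := by omega
      have hmain := loop_eq k a b all_result hkk ha hab hb hnh hlast hlen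
        (b + 1 - a).toNat all_result 0 a.toNat
        (by omega) (by omega) rfl
        (by
          intro j hj
          refine ⟨fun _ => rfl, fun h1 h2 => ?_⟩
          omega)
      rw [hcast] at hmain
      rw [process, process_alt, if_neg hba]
      exact hmain
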